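-- pv_equiv track=rewrite | github.com/voctenzuk/chatbot | src/bot/tools/import_card.py | _parse_mes_example
-- ===== SOURCE A (Python) =====
-- def _parse_mes_example(raw: str) -> list[str]:
--     """Parse <START> delimited example messages into a list of strings."""
--     if not raw or not raw.strip():
--         return []
--
--     blocks: list[str] = []
--     current: list[str] = []
--
--     for line in raw.strip().splitlines():
--         stripped = line.strip()
--         if stripped.upper() == "<START>":
--             if current:
--                 blocks.append("\n".join(current).strip())
--                 current = []
--         else:
--             current.append(line)
--
--     if current:
--         blocks.append("\n".join(current).strip())
--
--     return [b for b in blocks if b]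
-- ===== SOURCE B (Python) =====
-- def _parse_mes_example(raw: str) -> list[str]:
--     """Parse <START> delimited example messages into a list of strings."""
--     segments = [[]]
--     for line in reversed(raw.strip().splitlines()):
--         if line.strip().upper() == "<START>":
--             segments.insert(0, [])
--         else:
--             segments[0].insert(0, line)
--     blocks = ("\n".join(seg).strip() for seg in segments)
--     return [b for b in blocks if b]
-- ===== Notes on version B (the rewrite author's own statement) =====
-- stated objective: alternative
-- what changed: Replaces A's forward loop with a blocks/current accumulator and explicit flush logic by a backward pass that builds the list of line segments directly (new segment at each <START> marker, prepend otherwise), then maps join-and-strip over the segments and filters; the empty/whitespace guard disappears because the segment pipeline yields [] there naturally.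
import Mathlib
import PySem

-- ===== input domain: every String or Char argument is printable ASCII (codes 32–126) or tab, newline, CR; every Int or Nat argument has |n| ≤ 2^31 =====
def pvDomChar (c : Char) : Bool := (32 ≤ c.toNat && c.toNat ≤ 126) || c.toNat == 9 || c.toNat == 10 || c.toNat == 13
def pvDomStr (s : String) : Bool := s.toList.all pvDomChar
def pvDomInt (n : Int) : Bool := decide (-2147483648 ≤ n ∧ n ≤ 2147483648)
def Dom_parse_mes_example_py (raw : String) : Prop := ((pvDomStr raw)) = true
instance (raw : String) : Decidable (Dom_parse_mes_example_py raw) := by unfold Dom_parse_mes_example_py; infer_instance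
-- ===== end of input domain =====

-- B replaces A's forward accumulator-and-flush loop by a backward pass that builds the
-- segment list directly, then maps join-and-strip and filters (objective: alternative).

-- ===== PORT A =====
-- A's loop body: flush `current` into `blocks` at a <START> marker, otherwise accumulate the line.
def pvAStep (st : List String × List String) (line : String) : List String × List String :=
  if PySem.Str.upper (PySem.Str.strip line) == "<START>" then
    if st.2 ≠ [] then (st.1 ++ [PySem.Str.strip (PySem.Str.join "\n" st.2)], []) else st
  else
    (st.1, st.2 ++ [line])

def parse_mes_example_py (raw : String) : List String :=
  if raw == "" || PySem.Str.strip raw == "" then []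
  else
    let st := (PySem.Str.splitlines (PySem.Str.strip raw)).foldl pvAStep ([], [])
    let blocks := if st.2 ≠ [] then st.1 ++ [PySem.Str.strip (PySem.Str.join "\n" st.2)] else st.1
    blocks.filter (fun b => b != "")

-- ===== PORT B =====
-- B's loop body (lines processed back to front): start a fresh segment at a marker,
-- otherwise prepend the line to the front segment.
def pvBStep (line : String) (segments : List (List String)) : List (List String) :=
  if PySem.Str.upper (PySem.Str.strip line) == "<START>" then
    [] :: segments
  else
    segments.modifyHead (line :: ·)

def parse_mes_example_py_alt (raw : String) : List String :=
  let segments := (PySem.Str.splitlines (PySem.Str.strip raw)).foldr pvBStep [[]]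
  (segments.map (fun seg => PySem.Str.strip (PySem.Str.join "\n" seg))).filter (fun b => b != "")

-- ===== PRECONDITION & SPEC =====
def Spec_parse_mes_example_py (raw : String) (out : List String) : Prop := out = parse_mes_example_py_alt raw
instance (raw : String) (out : List String) : Decidable (Spec_parse_mes_example_py raw out) := by unfold Spec_parse_mes_example_py; infer_instance

-- ===== CLAIM (what is proved, stated in full; the proofs are below) =====
def Claim_equal_parse_mes_example_py : Prop := ∀ (raw : String), Dom_parse_mes_example_py raw → Spec_parse_mes_example_py raw (parse_mes_example_py raw)

-- ===== LEMMAS AND PROOFS =====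

lemma pvModifyHead_nil (xs : List (List String)) :
    xs.modifyHead (fun s => [] ++ s) = xs := by
  cases xs <;> simp

lemma pvModifyHead_modifyHead (xs : List (List String)) (g h : List String → List String) :
    (xs.modifyHead h).modifyHead g = xs.modifyHead (fun s => g (h s)) := by
  cases xs <;> simp

-- A's flushed fold equals B's segment fold (with pending prefix `cur` and emitted `blocks`).
lemma pvLoop_eq (lines : List String) : ∀ (blocks cur : List String),
    (if (lines.foldl pvAStep (blocks, cur)).2 ≠ [] then
        (lines.foldl pvAStep (blocks, cur)).1 ++
          [PySem.Str.strip (PySem.Str.join "\n" (lines.foldl pvAStep (blocks, cur)).2)]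
      else (lines.foldl pvAStep (blocks, cur)).1)
    = blocks ++
      (((lines.foldr pvBStep [[]]).modifyHead (fun s => cur ++ s)).filter
          (fun s => s != [])).map (fun seg => PySem.Str.strip (PySem.Str.join "\n" seg)) := by
  induction lines with
  | nil =>
    intro blocks cur
    cases cur <;> simp
  | cons l ls ih =>
    intro blocks cur
    rw [List.foldl_cons, List.foldr_cons]
    by_cases hp : (PySem.Str.upper (PySem.Str.strip l) == "<START>") = true
    · rw [show pvBStep l (ls.foldr pvBStep [[]]) = [] :: ls.foldr pvBStep [[]] from by
        simp [pvBStep, hp]]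
      by_cases hc : cur = []
      · subst hc
        rw [show pvAStep (blocks, ([] : List String)) l = (blocks, []) from by
          simp [pvAStep, hp]]
        rw [ih blocks [], pvModifyHead_nil, List.modifyHead_cons, List.append_nil,
          List.filter_cons_of_neg (by simp)]
      · rw [show pvAStep (blocks, cur) l
            = (blocks ++ [PySem.Str.strip (PySem.Str.join "\n" cur)], []) from by
          simp [pvAStep, hp, hc]]
        rw [ih (blocks ++ [PySem.Str.strip (PySem.Str.join "\n" cur)]) [], pvModifyHead_nil,
          List.modifyHead_cons, List.append_nil, List.filter_cons_of_pos (by simp [hc]),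
          List.map_cons]
        simp [List.append_assoc]
    · rw [show pvAStep (blocks, cur) l = (blocks, cur ++ [l]) from by simp [pvAStep, hp]]
      rw [show pvBStep l (ls.foldr pvBStep [[]])
          = (ls.foldr pvBStep [[]]).modifyHead (l :: ·) from by simp [pvBStep, hp]]
      rw [ih blocks (cur ++ [l]), pvModifyHead_modifyHead]
      simp

lemma pvFilter_bridge (xs : List (List String)) :
    ((xs.filter (fun s => s != [])).map (fun seg => PySem.Str.strip (PySem.Str.join "\n" seg))).filter
        (fun b => b != "")
    = ((xs.map (fun seg => PySem.Str.strip (PySem.Str.join "\n" seg))).filter (fun b => b != "")) := by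
  induction xs with
  | nil => simp
  | cons x xs ih =>
    by_cases hx : x = []
    · subst hx
      have h0 : PySem.Str.strip (PySem.Str.join "\n" ([] : List String)) = "" := by decide
      simp [h0, ih]
    · simp only [List.filter_cons, List.map_cons]
      rw [if_pos (by simp [hx])]
      simp only [List.map_cons, List.filter_cons]
      by_cases hb : (PySem.Str.strip (PySem.Str.join "\n" x) != "") = true <;> simp [hb, ih]

-- ===== VERDICT (by name: the statement is the Claim_ definition above) =====
theorem parse_mes_example_py_spec : Claim_equal_parse_mes_example_py := by
  intro raw _
  unfold Spec_parse_mes_example_py parse_mes_example_py parse_mes_example_py_alt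
  by_cases hg : (raw == "" || PySem.Str.strip raw == "") = true
  · have hs : PySem.Str.strip raw = "" := by
      rcases Bool.or_eq_true_iff.mp hg with h | h
      · have : raw = "" := by simpa using h
        subst this; decide
      · simpa using h
    rw [hs, if_pos (by simp)]
    decide
  · rw [if_neg hg]
    dsimp only
    rw [pvLoop_eq ((PySem.Str.splitlines (PySem.Str.strip raw))) [] [], pvModifyHead_nil,
      List.nil_append, pvFilter_bridge]
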